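-- pv_equiv track=rewrite | github.com/Nikhil-Narwade/Project_1 | prt54.py | is_match_regex
-- ===== SOURCE A (Python) =====
-- def is_match_regex(s, p):
--     m, n = len(s), len(p)
--     dp = [[False] * (n + 1) for _ in range(m + 1)]
--     dp[0][0] = True
--
--     # handle patterns like a*, a*b*, etc
--     for j in range(2, n + 1):
--         if p[j-1] == '*':
--             dp[0][j] = dp[0][j-2]
--
--     for i in range(1, m + 1):
--         for j in range(1, n + 1):
--             if p[j-1] == '*':
--                 dp[i][j] = dp[i][j-2]  # zero occurrences
--                 if s[i-1] == p[j-2] or p[j-2] == '.':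
--                     dp[i][j] = dp[i][j] or dp[i-1][j]  # one or more
--             elif p[j-1] == '.' or s[i-1] == p[j-1]:
--                 dp[i][j] = dp[i-1][j-1]
--
--     return dp[m][n]
-- ===== SOURCE B (Python) =====
-- from functools import lru_cache
--
-- def is_match_regex(s, p):
--     # Top-down memoized recursion on prefixes: match(i, j) <=> s[:i] matches p[:j].
--     # A '*' with no preceding element (j < 2) matches nothing.
--     @lru_cache(maxsize=None)
--     def match(i, j):
--         if j == 0:
--             return i == 0
--         if p[j-1] == '*':
--             return j >= 2 and (match(i, j-2) or
--                                (i >= 1 and (s[i-1] == p[j-2] or p[j-2] == '.') and match(i-1, j)))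
--         if p[j-1] == '.' or (i >= 1 and s[i-1] == p[j-1]):
--             return i >= 1 and match(i-1, j-1)
--         return False
--     return bool(match(len(s), len(p)))
-- ===== Notes on version B (the rewrite author's own statement) =====
-- stated objective: alternative
-- what changed: Replaces A's bottom-up (m+1)x(n+1) DP table (two explicit fill loops plus a pattern-only preprocessing loop) with a top-down memoized recursion match(i,j) on prefix lengths, where a '*' with no preceding pattern element matches nothing.
import Mathlib
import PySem

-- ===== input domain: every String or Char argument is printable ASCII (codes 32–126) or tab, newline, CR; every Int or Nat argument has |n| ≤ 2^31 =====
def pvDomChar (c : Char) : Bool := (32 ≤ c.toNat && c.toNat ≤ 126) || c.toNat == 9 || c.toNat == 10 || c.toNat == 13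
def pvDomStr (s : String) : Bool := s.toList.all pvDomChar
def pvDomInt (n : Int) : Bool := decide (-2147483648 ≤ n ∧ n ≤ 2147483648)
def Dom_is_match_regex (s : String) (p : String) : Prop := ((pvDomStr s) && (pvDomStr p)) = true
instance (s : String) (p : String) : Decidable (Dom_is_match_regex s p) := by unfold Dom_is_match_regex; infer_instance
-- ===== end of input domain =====

-- B replaces A's bottom-up m×n table with a top-down recursion on prefix lengths
-- (memoized in Source B via lru_cache — a pure cache, so its port is the plain recursion).

-- ===== PORT A =====
-- dp[i][j] read; A's reads are always in range (j-1 ∈ [0,n), and the one negative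
-- index dp[i][-1] / p[-1] wraps from the end, as pyGetD does), so the defaults are never used.
def pvGetCell (dp : List (List Bool)) (i j : Int) : Bool :=
  PySem.List.pyGetD (PySem.List.pyGetD dp i []) j false
-- dp[i][j] = v; A's writes are always in range, so the total form pySetD is exact.
def pvSetCell (dp : List (List Bool)) (i j : Int) (v : Bool) : List (List Bool) :=
  PySem.List.pySetD dp i (PySem.List.pySetD (PySem.List.pyGetD dp i []) j v)
-- p[k] (always in range where A evaluates it, including p[-1] via the wraparound)
def pvChar (cs : List Char) (k : Int) : Char := PySem.List.pyGetD cs k ' '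

def is_match_regex (s : String) (p : String) : Bool :=
  let sl := s.toList
  let pl := p.toList
  let m : Int := sl.length
  let n : Int := pl.length
  let dp : List (List Bool) :=
    (List.range (m.toNat + 1)).map (fun _ => List.replicate (n.toNat + 1) false)
  let dp := pvSetCell dp 0 0 true
  let dp := (PySem.List.pyRange 2 (n + 1) 1).foldl (fun dp j =>
      if pvChar pl (j - 1) = '*' then pvSetCell dp 0 j (pvGetCell dp 0 (j - 2)) else dp) dp
  let dp := (PySem.List.pyRange 1 (m + 1) 1).foldl (fun dp i =>
      (PySem.List.pyRange 1 (n + 1) 1).foldl (fun dp j =>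
        if pvChar pl (j - 1) = '*' then
          let dp := pvSetCell dp i j (pvGetCell dp i (j - 2))
          if pvChar sl (i - 1) = pvChar pl (j - 2) ∨ pvChar pl (j - 2) = '.' then
            pvSetCell dp i j (pvGetCell dp i j || pvGetCell dp (i - 1) j)
          else dp
        else if pvChar pl (j - 1) = '.' ∨ pvChar sl (i - 1) = pvChar pl (j - 1) then
          pvSetCell dp i j (pvGetCell dp (i - 1) (j - 1))
        else dp) dp) dp
  pvGetCell dp m n

-- ===== PORT B =====
-- match(i, j) of Source B: does s[:i] match p[:j]?  (Source B's lru_cache is dropped: it only caches.)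
def pvMatch (sl pl : List Char) (i j : Nat) : Bool :=
  if j = 0 then i == 0
  else if pl.getD (j - 1) ' ' = '*' then
    if h2 : 2 ≤ j then
      pvMatch sl pl i (j - 2) ||
        (if h1 : 1 ≤ i then
            (sl.getD (i - 1) ' ' == pl.getD (j - 2) ' ' || pl.getD (j - 2) ' ' == '.') &&
              pvMatch sl pl (i - 1) j
          else false)
    else false
  else if pl.getD (j - 1) ' ' = '.' ∨ (1 ≤ i ∧ sl.getD (i - 1) ' ' = pl.getD (j - 1) ' ') then
    if h1 : 1 ≤ i then pvMatch sl pl (i - 1) (j - 1) else false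
  else false
termination_by i + j
decreasing_by all_goals omega

def is_match_regex_alt (s : String) (p : String) : Bool :=
  pvMatch s.toList p.toList s.toList.length p.toList.length

-- ===== PRECONDITION & SPEC =====
def Spec_is_match_regex (s : String) (p : String) (out : Bool) : Prop := out = is_match_regex_alt s p
instance (s : String) (p : String) (out : Bool) : Decidable (Spec_is_match_regex s p out) := by unfold Spec_is_match_regex; infer_instance

-- ===== CLAIM (what is proved, stated in full; the proofs are below) =====
def Claim_equal_is_match_regex : Prop := ∀ (s : String) (p : String), Dom_is_match_regex s p → Spec_is_match_regex s p (is_match_regex s p)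

-- ===== LEMMAS AND PROOFS =====

-- canonical (m+1) × (n+1) table whose cells are given by a function
def pvTbl (m n : Nat) (f : Nat → Nat → Bool) : List (List Bool) :=
  (List.range (m + 1)).map (fun i => (List.range (n + 1)).map (f i))

-- pointwise update of a cell function
def pvUpd (f : Nat → Nat → Bool) (a b : Nat) (v : Bool) : Nat → Nat → Bool :=
  fun i j => if i = a ∧ j = b then v else f i j

-- the intended value of every cell after the first i0 rows of A's main loop
def pvG (sl pl : List Char) (i0 i j : Nat) : Bool :=
  if i ≤ i0 then pvMatch sl pl i j else false

-- the intended value of every cell while A is filling row r, after column j0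
def pvH (sl pl : List Char) (r j0 i j : Nat) : Bool :=
  if i < r then pvMatch sl pl i j
  else if i = r ∧ 1 ≤ j ∧ j ≤ j0 then pvMatch sl pl i j
  else false

-- cell values after A's first (pattern-only) loop up to column j0
def pvR0 (sl pl : List Char) (j0 i j : Nat) : Bool :=
  if i = 0 ∧ j ≤ j0 then pvMatch sl pl i j else false

theorem pvTbl_congr {m n : Nat} {f g : Nat → Nat → Bool}
    (h : ∀ i ≤ m, ∀ j ≤ n, f i j = g i j) : pvTbl m n f = pvTbl m n g := by
  unfold pvTbl
  refine List.map_congr_left ?_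
  intro i hi
  refine List.map_congr_left ?_
  intro j hj
  exact h i (Nat.lt_succ_iff.mp (List.mem_range.mp hi))
    j (Nat.lt_succ_iff.mp (List.mem_range.mp hj))

theorem pvRow_pvTbl {m n : Nat} (f : Nat → Nat → Bool) {i : Nat} (hi : i ≤ m) :
    PySem.List.pyGetD (pvTbl m n f) (i : Int) [] = (List.range (n + 1)).map (f i) := by
  unfold pvTbl
  simp [List.getD, Nat.lt_succ_iff, hi]

theorem pvGetCell_pvTbl {m n : Nat} (f : Nat → Nat → Bool) {i j : Nat}
    (hi : i ≤ m) (hj : j ≤ n) : pvGetCell (pvTbl m n f) i j = f i j := by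
  unfold pvGetCell
  rw [pvRow_pvTbl f hi]
  simp [List.getD, Nat.lt_succ_iff, hj]

theorem pvGetCell_pvTbl_zrow {m n : Nat} (f : Nat → Nat → Bool) {j : Nat}
    (hj : j ≤ n) : pvGetCell (pvTbl m n f) 0 j = f 0 j := by
  have h := pvGetCell_pvTbl (m := m) (n := n) f (i := 0) (j := j) (Nat.zero_le m) hj
  simpa using h

theorem pvGetCell_pvTbl_neg_one {m n : Nat} (f : Nat → Nat → Bool) {i : Nat}
    (hi : i ≤ m) : pvGetCell (pvTbl m n f) i (-1) = f i n := by
  unfold pvGetCell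
  rw [pvRow_pvTbl f hi]
  have hne : (List.range (n + 1)).map (f i) ≠ [] := by simp
  rw [PySem.List.pyGetD_neg_one _ _ hne, List.getLast_eq_getElem]
  simp

theorem pvSetCell_pvTbl {m n : Nat} (f : Nat → Nat → Bool) (v : Bool) {i j : Nat}
    (hi : i ≤ m) (hj : j ≤ n) :
    pvSetCell (pvTbl m n f) i j v = pvTbl m n (pvUpd f i j v) := by
  unfold pvSetCell
  rw [pvRow_pvTbl f hi]
  simp only [PySem.List.pySetD_natCast]
  unfold pvTbl pvUpd
  apply List.ext_getElem (by simp)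
  intro k hk hk'
  simp only [List.length_map, List.length_range] at hk'
  simp only [List.getElem_set, List.getElem_map, List.getElem_range]
  split_ifs with hik
  · apply List.ext_getElem (by simp)
    intro l hl hl'
    simp only [List.length_map, List.length_range] at hl'
    simp only [List.getElem_set, List.getElem_map, List.getElem_range]
    by_cases hjl : j = l
    · rw [if_pos hjl, if_pos ⟨by omega, by omega⟩]
    · rw [if_neg hjl, if_neg (fun hc => hjl hc.2.symm)]
      rw [hik]
  · apply List.ext_getElem (by simp)
    intro l hl hl'
    simp only [List.length_map, List.length_range] at hl'
    simp only [List.getElem_map, List.getElem_range]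
    rw [if_neg (fun hc => hik hc.1.symm)]

theorem pvSetCell_pvTbl_zrow {m n : Nat} (f : Nat → Nat → Bool) (v : Bool) {j : Nat}
    (hj : j ≤ n) :
    pvSetCell (pvTbl m n f) 0 j v = pvTbl m n (pvUpd f 0 j v) := by
  have h := pvSetCell_pvTbl (m := m) (n := n) f v (i := 0) (j := j) (Nat.zero_le m) hj
  simpa using h

-- unfolding lemmas for pvMatch
theorem pvMatch_zero_right {sl pl : List Char} {i : Nat} (h : 1 ≤ i) :
    pvMatch sl pl i 0 = false := by
  rw [pvMatch]
  rw [if_pos rfl]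
  simp
  omega

theorem pvMatch_zero_zero {sl pl : List Char} : pvMatch sl pl 0 0 = true := by
  rw [pvMatch]
  simp

theorem pvMatch_one_star {sl pl : List Char} (h : pl.getD 0 ' ' = '*') (i : Nat) :
    pvMatch sl pl i 1 = false := by
  rw [pvMatch]
  rw [if_neg (by omega), show (1 : Nat) - 1 = 0 from rfl, if_pos h, dif_neg (by omega)]

theorem pvMatch_zero_one {sl pl : List Char} : pvMatch sl pl 0 1 = false := by
  rw [pvMatch]
  rw [if_neg (by omega), show (1 : Nat) - 1 = 0 from rfl]
  by_cases h : pl.getD 0 ' ' = '*'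
  · rw [if_pos h, dif_neg (by omega)]
  · rw [if_neg h]
    by_cases hc : pl.getD 0 ' ' = '.' ∨ (1 ≤ 0 ∧ sl.getD (0 - 1) ' ' = pl.getD 0 ' ')
    · rw [if_pos hc, dif_neg (by omega)]
    · rw [if_neg hc]

theorem pvMatch_star {sl pl : List Char} {j0 r : Nat}
    (h : pl.getD j0 ' ' = '*') (hj : 1 ≤ j0) (hr : 1 ≤ r) :
    pvMatch sl pl r (j0 + 1)
      = (pvMatch sl pl r (j0 - 1) ||
          ((sl.getD (r - 1) ' ' == pl.getD (j0 - 1) ' ' || pl.getD (j0 - 1) ' ' == '.') &&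
            pvMatch sl pl (r - 1) (j0 + 1))) := by
  rw [pvMatch]
  have e1 : j0 + 1 - 1 = j0 := by omega
  have e2 : j0 + 1 - 2 = j0 - 1 := by omega
  rw [e1, e2, if_neg (by omega), if_pos h, dif_pos (by omega), dif_pos hr]

theorem pvMatch_star_zero {sl pl : List Char} {j0 : Nat}
    (h : pl.getD j0 ' ' = '*') (hj : 1 ≤ j0) :
    pvMatch sl pl 0 (j0 + 1) = pvMatch sl pl 0 (j0 - 1) := by
  rw [pvMatch]
  have e1 : j0 + 1 - 1 = j0 := by omega
  have e2 : j0 + 1 - 2 = j0 - 1 := by omega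
  rw [e1, e2, if_neg (by omega), if_pos h, dif_pos (by omega), dif_neg (by omega)]
  simp

theorem pvMatch_nonstar {sl pl : List Char} {j0 r : Nat}
    (h : ¬ pl.getD j0 ' ' = '*') (hr : 1 ≤ r) :
    pvMatch sl pl r (j0 + 1)
      = (if pl.getD j0 ' ' = '.' ∨ sl.getD (r - 1) ' ' = pl.getD j0 ' ' then
          pvMatch sl pl (r - 1) j0 else false) := by
  rw [pvMatch]
  have e1 : j0 + 1 - 1 = j0 := by omega
  rw [e1, if_neg (by omega), if_neg h]
  by_cases hc : pl.getD j0 ' ' = '.' ∨ sl.getD (r - 1) ' ' = pl.getD j0 ' '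
  · rw [if_pos hc, if_pos (by tauto), dif_pos hr]
  · rw [if_neg hc, if_neg (by tauto)]

theorem pvMatch_nonstar_zero {sl pl : List Char} {j0 : Nat}
    (h : ¬ pl.getD j0 ' ' = '*') :
    pvMatch sl pl 0 (j0 + 1) = false := by
  rw [pvMatch]
  have e1 : j0 + 1 - 1 = j0 := by omega
  rw [e1, if_neg (by omega), if_neg h]
  by_cases hc : pl.getD j0 ' ' = '.' ∨ (1 ≤ 0 ∧ sl.getD (0 - 1) ' ' = pl.getD j0 ' ')
  · rw [if_pos hc, dif_neg (by omega)]
  · rw [if_neg hc]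

-- A's first loop (row 0) computes pvR0
theorem pvRow0_fold {sl pl : List Char} {m n : Nat} {j0 : Nat}
    (h1 : 1 ≤ j0) (hj0 : j0 ≤ n) :
    (PySem.List.pyRange 2 ((j0 : Int) + 1) 1).foldl (fun dp j =>
        if pvChar pl (j - 1) = '*' then pvSetCell dp 0 j (pvGetCell dp 0 (j - 2)) else dp)
      (pvTbl m n (pvR0 sl pl 1))
      = pvTbl m n (pvR0 sl pl j0) := by
  induction j0 with
  | zero => omega
  | succ j0 ih =>
    by_cases hj1 : j0 = 0
    · subst hj1
      rw [show (((0 + 1 : Nat)) : Int) + 1 = 2 by norm_num,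
        PySem.List.pyRange_one_eq_nil (by norm_num)]
      rfl
    · have hstep : ((j0 + 1 : Nat) : Int) + 1 = (((j0 : Int) + 1) + 1) := by push_cast; ring
      rw [hstep, PySem.List.pyRange_one_succ_right (by omega), List.foldl_append,
        ih (by omega) (by omega)]
      simp only [List.foldl_cons, List.foldl_nil]
      have ej1 : ((j0 : Int) + 1 - 1) = ((j0 : Nat) : Int) := by push_cast; ring
      rw [ej1]
      have ecast : ((j0 : Int) + 1) = (((j0 + 1 : Nat)) : Int) := by push_cast; ring
      rw [ecast]
      have hcharp : ∀ k : Nat, pvChar pl ((k : Nat) : Int) = pl.getD k ' ' := by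
        intro k; simp [pvChar]
      simp only [hcharp]
      by_cases hstar : pl.getD j0 ' ' = '*'
      · rw [if_pos hstar]
        have ej2 : (((j0 + 1 : Nat)) : Int) - 2 = (((j0 - 1 : Nat)) : Int) := by omega
        rw [ej2, pvGetCell_pvTbl_zrow _ (by omega)]
        have hcell : pvR0 sl pl j0 0 (j0 - 1) = pvMatch sl pl 0 (j0 - 1) := by
          unfold pvR0
          rw [if_pos ⟨rfl, by omega⟩]
        rw [hcell, pvSetCell_pvTbl_zrow _ _ (by omega)]
        apply pvTbl_congr
        intro i hi j hj
        unfold pvUpd pvR0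
        by_cases hij : i = 0 ∧ j = j0 + 1
        · obtain ⟨hi0, hjj⟩ := hij
          subst hi0; subst hjj
          rw [if_pos ⟨rfl, rfl⟩, if_pos ⟨rfl, le_refl _⟩, pvMatch_star_zero hstar (by omega)]
        · rw [if_neg hij]
          by_cases hiz : i = 0
          · subst hiz
            by_cases hjle : j ≤ j0
            · rw [if_pos ⟨rfl, hjle⟩, if_pos ⟨rfl, by omega⟩]
            · rw [if_neg (by tauto), if_neg (by omega)]
          · rw [if_neg (by tauto), if_neg (by tauto)]
      · rw [if_neg hstar]
        apply pvTbl_congr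
        intro i hi j hj
        unfold pvR0
        by_cases hij : i = 0 ∧ j = j0 + 1
        · obtain ⟨hi0, hjj⟩ := hij
          subst hi0; subst hjj
          rw [if_neg (by omega), if_pos ⟨rfl, le_refl _⟩, pvMatch_nonstar_zero hstar]
        · by_cases hiz : i = 0
          · subst hiz
            by_cases hjle : j ≤ j0
            · rw [if_pos ⟨rfl, hjle⟩, if_pos ⟨rfl, by omega⟩]
            · rw [if_neg (by tauto), if_neg (by omega)]
          · rw [if_neg (by tauto), if_neg (by tauto)]

-- A's inner loop on row r computes pvH r
theorem pvInner_fold {sl pl : List Char} {m n : Nat} {r : Nat}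
    (hr : 1 ≤ r) (hrm : r ≤ m) {j0 : Nat} (hj0 : j0 ≤ n) :
    (PySem.List.pyRange 1 ((j0 : Int) + 1) 1).foldl (fun dp j =>
        if pvChar pl (j - 1) = '*' then
          if pvChar sl ((r : Int) - 1) = pvChar pl (j - 2) ∨ pvChar pl (j - 2) = '.' then
            pvSetCell (pvSetCell dp (r : Int) j (pvGetCell dp (r : Int) (j - 2))) (r : Int) j
              (pvGetCell (pvSetCell dp (r : Int) j (pvGetCell dp (r : Int) (j - 2))) (r : Int) j ||
                pvGetCell (pvSetCell dp (r : Int) j (pvGetCell dp (r : Int) (j - 2))) ((r : Int) - 1) j)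
          else pvSetCell dp (r : Int) j (pvGetCell dp (r : Int) (j - 2))
        else if pvChar pl (j - 1) = '.' ∨ pvChar sl ((r : Int) - 1) = pvChar pl (j - 1) then
          pvSetCell dp (r : Int) j (pvGetCell dp ((r : Int) - 1) (j - 1))
        else dp)
      (pvTbl m n (pvH sl pl r 0))
      = pvTbl m n (pvH sl pl r j0) := by
  induction j0 with
  | zero =>
    rw [show (((0 : Nat)) : Int) + 1 = 1 by norm_num,
      PySem.List.pyRange_one_eq_nil (by norm_num)]
    rfl
  | succ j0 ih =>
    have hstep : ((j0 + 1 : Nat) : Int) + 1 = (((j0 : Int) + 1) + 1) := by push_cast; ring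
    rw [hstep, PySem.List.pyRange_one_succ_right (by omega), List.foldl_append,
      ih (by omega)]
    simp only [List.foldl_cons, List.foldl_nil]
    have ej1 : ((j0 : Int) + 1 - 1) = ((j0 : Nat) : Int) := by push_cast; ring
    rw [ej1]
    have ecast : ((j0 : Int) + 1) = (((j0 + 1 : Nat)) : Int) := by push_cast; ring
    rw [ecast]
    have er1 : ((r : Int) - 1) = (((r - 1 : Nat)) : Int) := by omega
    rw [er1]
    have hcharp : ∀ k : Nat, pvChar pl ((k : Nat) : Int) = pl.getD k ' ' := by
      intro k; simp [pvChar]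
    have hchars : ∀ k : Nat, pvChar sl ((k : Nat) : Int) = sl.getD k ' ' := by
      intro k; simp [pvChar]
    simp only [hcharp, hchars]
    by_cases hstar : pl.getD j0 ' ' = '*'
    · rw [if_pos hstar]
      by_cases hj1 : 1 ≤ j0
      · have ej2 : (((j0 + 1 : Nat)) : Int) - 2 = (((j0 - 1 : Nat)) : Int) := by omega
        rw [ej2]
        simp only [hcharp]
        rw [pvGetCell_pvTbl _ hrm (by omega)]
        have hcell : pvH sl pl r j0 r (j0 - 1) = pvMatch sl pl r (j0 - 1) := by
          unfold pvH
          by_cases h11 : 1 ≤ j0 - 1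
          · rw [if_neg (by omega), if_pos ⟨rfl, h11, by omega⟩]
          · rw [if_neg (by omega), if_neg (by omega), show j0 - 1 = 0 by omega,
              pvMatch_zero_right hr]
        rw [hcell, pvSetCell_pvTbl _ _ hrm (by omega)]
        have hread1 : pvGetCell (pvTbl m n (pvUpd (pvH sl pl r j0) r (j0 + 1) (pvMatch sl pl r (j0 - 1)))) (r : Int) ((j0 + 1 : Nat) : Int) = pvMatch sl pl r (j0 - 1) := by
          rw [pvGetCell_pvTbl _ hrm (by omega)]
          unfold pvUpd
          rw [if_pos ⟨rfl, rfl⟩]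
        have hread2 : pvGetCell (pvTbl m n (pvUpd (pvH sl pl r j0) r (j0 + 1) (pvMatch sl pl r (j0 - 1)))) ((r - 1 : Nat) : Int) ((j0 + 1 : Nat) : Int) = pvMatch sl pl (r - 1) (j0 + 1) := by
          rw [pvGetCell_pvTbl _ (by omega) (by omega)]
          unfold pvUpd pvH
          rw [if_neg (by omega), if_pos (by omega)]
        by_cases hcond : sl.getD (r - 1) ' ' = pl.getD (j0 - 1) ' ' ∨ pl.getD (j0 - 1) ' ' = '.'
        · rw [if_pos hcond, hread1, hread2, pvSetCell_pvTbl _ _ hrm (by omega)]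
          apply pvTbl_congr
          intro i hi j hj
          unfold pvUpd
          by_cases hij : i = r ∧ j = j0 + 1
          · obtain ⟨hi0, hjj⟩ := hij
            subst hi0; subst hjj
            rw [if_pos ⟨rfl, rfl⟩]
            unfold pvH
            rw [if_neg (by omega), if_pos ⟨rfl, by omega, le_refl _⟩,
              pvMatch_star hstar hj1 hr]
            rcases hcond with h | h <;> rw [h] <;> simp
          · rw [if_neg hij, if_neg hij]
            unfold pvH
            by_cases hir : i = r
            · subst hir
              by_cases hjle : 1 ≤ j ∧ j ≤ j0
              · rw [if_neg (by omega), if_pos ⟨rfl, hjle.1, hjle.2⟩,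
                  if_neg (by omega), if_pos ⟨rfl, hjle.1, by omega⟩]
              · rw [if_neg (by omega), if_neg (by omega), if_neg (by omega), if_neg (by omega)]
            · by_cases hilt : i < r
              · rw [if_pos hilt, if_pos hilt]
              · rw [if_neg hilt, if_neg (by tauto), if_neg hilt, if_neg (by tauto)]
        · rw [if_neg hcond]
          apply pvTbl_congr
          intro i hi j hj
          unfold pvUpd
          by_cases hij : i = r ∧ j = j0 + 1
          · obtain ⟨hi0, hjj⟩ := hij
            subst hi0; subst hjj
            rw [if_pos ⟨rfl, rfl⟩]
            unfold pvH
            rw [if_neg (by omega), if_pos ⟨rfl, by omega, le_refl _⟩,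
              pvMatch_star hstar hj1 hr]
            push_neg at hcond
            simp only [List.getD] at hcond ⊢
            simp [hcond.1, hcond.2]
          · rw [if_neg hij]
            unfold pvH
            by_cases hir : i = r
            · subst hir
              by_cases hjle : 1 ≤ j ∧ j ≤ j0
              · rw [if_neg (by omega), if_pos ⟨rfl, hjle.1, hjle.2⟩,
                  if_neg (by omega), if_pos ⟨rfl, hjle.1, by omega⟩]
              · rw [if_neg (by omega), if_neg (by omega), if_neg (by omega), if_neg (by omega)]
            · by_cases hilt : i < r
              · rw [if_pos hilt, if_pos hilt]
              · rw [if_neg hilt, if_neg (by tauto), if_neg hilt, if_neg (by tauto)]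
      · -- j0 = 0: A reads dp[r][-1] (a stale false) and p[-1]; the written cell is
        -- false, which is exactly pvMatch r 1 for a pattern that starts with '*'
        have hj00 : j0 = 0 := by omega
        subst hj00
        have ej2 : (((0 + 1 : Nat)) : Int) - 2 = (-1 : Int) := by norm_num
        rw [ej2, pvGetCell_pvTbl_neg_one _ hrm]
        have hstale : pvH sl pl r 0 r n = false := by
          unfold pvH
          rw [if_neg (by omega), if_neg (by omega)]
        rw [hstale, pvSetCell_pvTbl _ _ hrm (by omega)]
        have hfin : pvTbl m n (pvUpd (pvH sl pl r 0) r (0 + 1) false) = pvTbl m n (pvH sl pl r (0 + 1)) := by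
          apply pvTbl_congr
          intro i hi j hj
          unfold pvUpd pvH
          by_cases hij : i = r ∧ j = 0 + 1
          · obtain ⟨hi0, hjj⟩ := hij
            subst hi0; subst hjj
            rw [if_pos ⟨rfl, rfl⟩, if_neg (by omega), if_pos ⟨rfl, by omega, le_refl _⟩,
              pvMatch_one_star hstar]
          · rw [if_neg hij]
            by_cases hir : i = r
            · subst hir
              rw [if_neg (by omega), if_neg (by omega), if_neg (by omega), if_neg (by omega)]
            · by_cases hilt : i < r
              · rw [if_pos hilt, if_pos hilt]
              · rw [if_neg hilt, if_neg (by tauto), if_neg hilt, if_neg (by tauto)]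
        by_cases hcond : sl.getD (r - 1) ' ' = pvChar pl (-1) ∨ pvChar pl (-1) = '.'
        · rw [if_pos hcond]
          have hread1 : pvGetCell (pvTbl m n (pvUpd (pvH sl pl r 0) r (0 + 1) false)) (r : Int) ((0 + 1 : Nat) : Int) = false := by
            rw [pvGetCell_pvTbl _ hrm (by omega)]
            unfold pvUpd
            rw [if_pos ⟨rfl, rfl⟩]
          have hread2 : pvGetCell (pvTbl m n (pvUpd (pvH sl pl r 0) r (0 + 1) false)) ((r - 1 : Nat) : Int) ((0 + 1 : Nat) : Int) = false := by
            rw [pvGetCell_pvTbl _ (by omega) (by omega)]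
            unfold pvUpd pvH
            rw [if_neg (by omega), if_pos (by omega), pvMatch_one_star hstar]
          rw [hread1, hread2, Bool.or_self, pvSetCell_pvTbl _ _ hrm (by omega)]
          rw [← hfin]
          apply pvTbl_congr
          intro i hi j hj
          unfold pvUpd
          by_cases hij : i = r ∧ j = 0 + 1
          · rw [if_pos hij, if_pos hij]
          · rw [if_neg hij, if_neg hij]
        · rw [if_neg hcond]
          exact hfin
    · rw [if_neg hstar]
      by_cases hcond : pl.getD j0 ' ' = '.' ∨ sl.getD (r - 1) ' ' = pl.getD j0 ' '
      · rw [if_pos hcond, pvGetCell_pvTbl _ (by omega) (by omega)]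
        have hprev : pvH sl pl r j0 (r - 1) j0 = pvMatch sl pl (r - 1) j0 := by
          unfold pvH
          rw [if_pos (by omega)]
        rw [hprev, pvSetCell_pvTbl _ _ hrm (by omega)]
        apply pvTbl_congr
        intro i hi j hj
        unfold pvUpd
        by_cases hij : i = r ∧ j = j0 + 1
        · obtain ⟨hi0, hjj⟩ := hij
          subst hi0; subst hjj
          rw [if_pos ⟨rfl, rfl⟩]
          unfold pvH
          rw [if_neg (by omega), if_pos ⟨rfl, by omega, le_refl _⟩,
            pvMatch_nonstar hstar hr, if_pos hcond]
        · rw [if_neg hij]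
          unfold pvH
          by_cases hir : i = r
          · subst hir
            by_cases hjle : 1 ≤ j ∧ j ≤ j0
            · rw [if_neg (by omega), if_pos ⟨rfl, hjle.1, hjle.2⟩,
                if_neg (by omega), if_pos ⟨rfl, hjle.1, by omega⟩]
            · rw [if_neg (by omega), if_neg (by omega), if_neg (by omega), if_neg (by omega)]
          · by_cases hilt : i < r
            · rw [if_pos hilt, if_pos hilt]
            · rw [if_neg hilt, if_neg (by tauto), if_neg hilt, if_neg (by tauto)]
      · rw [if_neg hcond]
        apply pvTbl_congr
        intro i hi j hj
        unfold pvH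
        by_cases hij : i = r ∧ j = j0 + 1
        · obtain ⟨hi0, hjj⟩ := hij
          subst hi0; subst hjj
          rw [if_neg (by omega), if_neg (by omega), if_neg (by omega),
            if_pos ⟨rfl, by omega, le_refl _⟩, pvMatch_nonstar hstar hr, if_neg hcond]
        · by_cases hir : i = r
          · subst hir
            by_cases hjle : 1 ≤ j ∧ j ≤ j0
            · rw [if_neg (by omega), if_pos ⟨rfl, hjle.1, hjle.2⟩,
                if_neg (by omega), if_pos ⟨rfl, hjle.1, by omega⟩]
            · rw [if_neg (by omega), if_neg (by omega), if_neg (by omega), if_neg (by omega)]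
          · by_cases hilt : i < r
            · rw [if_pos hilt, if_pos hilt]
            · rw [if_neg hilt, if_neg (by tauto), if_neg hilt, if_neg (by tauto)]

-- A's outer loop computes pvG
theorem pvOuter_fold {sl pl : List Char} {m n : Nat} {i0 : Nat} (hi0 : i0 ≤ m) :
    (PySem.List.pyRange 1 ((i0 : Int) + 1) 1).foldl (fun dp i =>
        (PySem.List.pyRange 1 ((n : Int) + 1) 1).foldl (fun dp j =>
          if pvChar pl (j - 1) = '*' then
            if pvChar sl (i - 1) = pvChar pl (j - 2) ∨ pvChar pl (j - 2) = '.' then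
              pvSetCell (pvSetCell dp i j (pvGetCell dp i (j - 2))) i j
                (pvGetCell (pvSetCell dp i j (pvGetCell dp i (j - 2))) i j ||
                  pvGetCell (pvSetCell dp i j (pvGetCell dp i (j - 2))) (i - 1) j)
            else pvSetCell dp i j (pvGetCell dp i (j - 2))
          else if pvChar pl (j - 1) = '.' ∨ pvChar sl (i - 1) = pvChar pl (j - 1) then
            pvSetCell dp i j (pvGetCell dp (i - 1) (j - 1))
          else dp) dp)
      (pvTbl m n (pvG sl pl 0))
      = pvTbl m n (pvG sl pl i0) := by
  induction i0 with
  | zero =>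
    rw [show (((0 : Nat)) : Int) + 1 = 1 by norm_num,
      PySem.List.pyRange_one_eq_nil (a := 1) (b := 1) (by norm_num)]
    rfl
  | succ i0 ih =>
    have hstep : ((i0 + 1 : Nat) : Int) + 1 = (((i0 : Int) + 1) + 1) := by push_cast; ring
    rw [hstep, PySem.List.pyRange_one_succ_right (a := 1) (b := ((i0 : Int) + 1)) (by omega),
      List.foldl_append, ih (by omega)]
    simp only [List.foldl_cons, List.foldl_nil]
    have ecast : ((i0 : Int) + 1) = (((i0 + 1 : Nat)) : Int) := by push_cast; ring
    rw [ecast]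
    have h0 : pvTbl m n (pvG sl pl i0) = pvTbl m n (pvH sl pl (i0 + 1) 0) := by
      apply pvTbl_congr
      intro i hi j hj
      unfold pvG pvH
      by_cases h : i < i0 + 1
      · rw [if_pos (by omega), if_pos h]
      · rw [if_neg (by omega), if_neg h, if_neg (by omega)]
    rw [h0, pvInner_fold (by omega) (by omega) (le_refl n)]
    apply pvTbl_congr
    intro i hi j hj
    unfold pvH pvG
    by_cases h : i < i0 + 1
    · rw [if_pos h, if_pos (by omega)]
    · by_cases h2 : i = i0 + 1
      · subst h2
        by_cases h3 : 1 ≤ j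
        · rw [if_neg h, if_pos ⟨rfl, h3, hj⟩, if_pos (by omega)]
        · rw [if_neg h, if_neg (by omega), if_pos (by omega), show j = 0 by omega,
            pvMatch_zero_right (by omega)]
      · rw [if_neg h, if_neg (by omega), if_neg (by omega)]

-- ===== VERDICT (by name: the statement is the Claim_ definition above) =====
theorem is_match_regex_spec : Claim_equal_is_match_regex := by
  unfold Claim_equal_is_match_regex Spec_is_match_regex
  intro s p _
  unfold is_match_regex is_match_regex_alt
  simp only [Int.toNat_natCast]
  have hinit : ((List.range (s.toList.length + 1)).map
      (fun _ => List.replicate (p.toList.length + 1) false))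
      = pvTbl s.toList.length p.toList.length (fun _ _ => false) := by
    unfold pvTbl
    refine List.map_congr_left ?_
    intro i _
    simp [List.map_const']
  rw [hinit]
  have hset : pvSetCell (pvTbl s.toList.length p.toList.length (fun _ _ => false)) 0 0 true
      = pvTbl s.toList.length p.toList.length (pvUpd (fun _ _ => false) 0 0 true) := by
    have h := pvSetCell_pvTbl (m := s.toList.length) (n := p.toList.length)
      (fun _ _ => false) true (i := 0) (j := 0) (Nat.zero_le _) (Nat.zero_le _)
    simpa using h
  rw [hset]
  have h01 : pvTbl s.toList.length p.toList.length (pvUpd (fun _ _ => false) 0 0 true)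
      = pvTbl s.toList.length p.toList.length (pvR0 s.toList p.toList 1) := by
    apply pvTbl_congr
    intro i hi j hj
    unfold pvUpd pvR0
    by_cases h : i = 0 ∧ j = 0
    · obtain ⟨h1, h2⟩ := h
      subst h1; subst h2
      rw [if_pos ⟨rfl, rfl⟩, if_pos ⟨rfl, by omega⟩, pvMatch_zero_zero]
    · rw [if_neg h]
      by_cases h2 : i = 0 ∧ j ≤ 1
      · have hj1 : j = 1 := by omega
        obtain ⟨h1, _⟩ := h2
        subst h1; subst hj1
        rw [if_pos ⟨rfl, le_refl _⟩, pvMatch_zero_one]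
      · rw [if_neg h2]
  rw [h01]
  by_cases hn : 1 ≤ p.toList.length
  · rw [pvRow0_fold hn (le_refl _)]
    have h02 : pvTbl s.toList.length p.toList.length (pvR0 s.toList p.toList p.toList.length)
        = pvTbl s.toList.length p.toList.length (pvG s.toList p.toList 0) := by
      apply pvTbl_congr
      intro i hi j hj
      unfold pvR0 pvG
      by_cases h : i = 0
      · subst h
        rw [if_pos ⟨rfl, hj⟩, if_pos (by omega)]
      · rw [if_neg (by tauto), if_neg (by omega)]
    rw [h02, pvOuter_fold (le_refl _), pvGetCell_pvTbl _ (le_refl _) (le_refl _)]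
    unfold pvG
    rw [if_pos (le_refl _)]
  · rw [PySem.List.pyRange_one_eq_nil (a := 2) (by omega), List.foldl_nil]
    have h02 : pvTbl s.toList.length p.toList.length (pvR0 s.toList p.toList 1)
        = pvTbl s.toList.length p.toList.length (pvG s.toList p.toList 0) := by
      apply pvTbl_congr
      intro i hi j hj
      unfold pvR0 pvG
      by_cases h : i = 0
      · subst h
        rw [if_pos ⟨rfl, by omega⟩, if_pos (by omega)]
      · rw [if_neg (by tauto), if_neg (by omega)]
    rw [h02, pvOuter_fold (le_refl _), pvGetCell_pvTbl _ (le_refl _) (le_refl _)]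
    unfold pvG
    rw [if_pos (le_refl _)]
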